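-- pv_equiv track=rewrite | github.com/S0Ulle33/Advent-of-Code-2018 | Day 5/solution.py | part_one
-- ===== SOURCE A (Python) =====
-- def part_one(polymer):
--     '''
--     Question:
--         How many units remain after fully reacting the polymer you scanned?
--
--     Performs a reaction on the polymer, gets the remaining units in list.
--     Result is the length of that list.
--     '''
--
--     def can_react(unit1, unit2):
--         '''
--         Returns True if given units are same type and have opposite polarities.
--
--         >>>can_react('a', 'A')
--         True
--         >>>can_react('a', 'B')
--         False
--         '''
--
--         def same_type(unit1, unit2):
--             '''
--             Returns True if given units are same type.
--
--             >>>same_type('e', 'E')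
--             True
--             >>>same_type('e', 'c')
--             False
--             '''
--
--             return unit1.lower() == unit2.lower()
--
--         def opposite_polarity(unit1, unit2):
--             '''
--             Returns True if given units are same type.
--
--             >>>opposite_polarity('e', 'E')
--             True
--             >>>opposite_polarity('e', 'e')
--             False
--             '''
--
--             return ((unit1.isupper() and unit2.islower()) or
--                     (unit1.islower() and unit2.isupper()))
--
--         return (same_type(unit1, unit2) and
--                 opposite_polarity(unit1, unit2))
--
--     def do_reaction(polymer):
--         '''
--         Reacts the polymer, returns remaining units.
--
--         dabAcCaCBAcCcaDA  The first 'cC' is removed.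
--         dabAaCBAcCcaDA    This creates 'Aa', which is removed.
--         dabCBAcCcaDA      Either 'cC' or 'Cc' are removed.
--         dabCBAcaDA        No further actions can be taken.
--         '''
--
--         remaining_units = []
--
--         for unit in polymer:
--             if remaining_units and can_react(unit, remaining_units[-1]):
--                 remaining_units.pop()
--             else:
--                 remaining_units.append(unit)
--
--         return remaining_units
--
--     # Performs a reaction and gets the remaining units
--     units = do_reaction(polymer)
--     # Returns how many units remaining
--     return len(units)
-- ===== SOURCE B (Python) =====
-- def part_one(polymer):
--     def can_react(unit1, unit2):
--         return (unit1.lower() == unit2.lower() and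
--                 ((unit1.isupper() and unit2.islower()) or
--                  (unit1.islower() and unit2.isupper())))
--
--     units = list(polymer)
--     while True:
--         out = []
--         i = 0
--         while i < len(units):
--             if i + 1 < len(units) and can_react(units[i], units[i + 1]):
--                 i += 2
--             else:
--                 out.append(units[i])
--                 i += 1
--         if len(out) == len(units):
--             return len(out)
--         units = out
-- ===== Notes on version B (the rewrite author's own statement) =====
-- stated objective: alternative
-- what changed: Replaces A's single stack-based pass (push unit, pop on reaction with the top) by the naive fixed-point algorithm: repeatedly sweep the list left to right dropping both members of each adjacent reacting pair until a sweep removes nothing; confluence of the reaction makes the final count identical.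
import Mathlib
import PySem

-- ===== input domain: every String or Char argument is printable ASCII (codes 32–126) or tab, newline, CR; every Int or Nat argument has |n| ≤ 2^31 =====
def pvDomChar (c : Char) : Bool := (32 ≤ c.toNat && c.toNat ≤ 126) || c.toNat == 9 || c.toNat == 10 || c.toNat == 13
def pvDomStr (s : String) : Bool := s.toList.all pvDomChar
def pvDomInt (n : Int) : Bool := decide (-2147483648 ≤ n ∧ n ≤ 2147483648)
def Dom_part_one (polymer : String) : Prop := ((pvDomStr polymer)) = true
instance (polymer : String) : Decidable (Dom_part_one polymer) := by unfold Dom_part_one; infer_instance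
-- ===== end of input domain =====

-- B replaces A's single stack pass by repeated adjacent-pair-removal sweeps to a fixed point
-- (objective: alternative algorithm); equivalence rests on confluence of the reaction.


-- shared predicate: both Pythons define the identical can_react
def canReact (unit1 unit2 : Char) : Bool :=
  (PySem.Chars.lowerChar unit1 == PySem.Chars.lowerChar unit2) &&
  ((PySem.Chars.isupper unit1 && PySem.Chars.islower unit2) ||
   (PySem.Chars.islower unit1 && PySem.Chars.isupper unit2))

-- ===== PORT A =====
-- body of A's for-loop: pop the reacting top (list end), else append
def stepA (remaining_units : List Char) (unit : Char) : List Char :=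
  match remaining_units.getLast? with
  | some last => if canReact unit last then remaining_units.dropLast
                 else remaining_units ++ [unit]
  | none => remaining_units ++ [unit]

def doReaction (polymer : List Char) : List Char :=
  polymer.foldl stepA []

def part_one (polymer : String) : Int :=
  Int.ofNat (doReaction polymer.toList).length

-- ===== PORT B =====
-- one left-to-right sweep: drop both members of each adjacent reacting pair
def passB : List Char → List Char
  | a :: b :: t => if canReact a b then passB t else a :: passB (b :: t)
  | l => l

-- needed by loopB's termination proof
theorem passB_length_le (l : List Char) : (passB l).length ≤ l.length := by
  induction l using passB.induct with
  | case1 a b t h ih =>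
    rw [passB, if_pos h]
    simp only [List.length_cons]
    omega
  | case2 a b t h ih =>
    rw [passB, if_neg h]
    simp only [List.length_cons] at ih ⊢
    omega
  | case3 l h =>
    cases l with
    | nil => simp [passB]
    | cons a t => cases t with
      | nil => simp [passB]
      | cons b t' => exact absurd rfl (h a b t')

-- repeat the sweep until a sweep removes nothing, then return the length
def loopB (units : List Char) : Int :=
  if h : (passB units).length = units.length then Int.ofNat (passB units).length
  else loopB (passB units)
termination_by units.length
decreasing_by
  have := passB_length_le units
  omega

def part_one_alt (polymer : String) : Int :=
  loopB polymer.toList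

-- ===== PRECONDITION & SPEC =====
def Spec_part_one (polymer : String) (out : Int) : Prop := out = part_one_alt polymer
instance (polymer : String) (out : Int) : Decidable (Spec_part_one polymer out) := by unfold Spec_part_one; infer_instance

-- ===== CLAIM (what is proved, stated in full; the proofs are below) =====
def Claim_equal_part_one : Prop := ∀ (polymer : String), Dom_part_one polymer → Spec_part_one polymer (part_one polymer)

-- ===== LEMMAS AND PROOFS =====

-- irreducible: no adjacent pair reacts
def Irr (l : List Char) : Prop := List.IsChain (fun a b => canReact a b = false) l

theorem char_le_iff (a b : Char) : a ≤ b ↔ a.toNat ≤ b.toNat := by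
  rw [Char.le_def]
  exact UInt32.le_iff_toNat_le

theorem isupper_iff (c : Char) :
    PySem.Chars.isupper c = true ↔ 65 ≤ c.toNat ∧ c.toNat ≤ 90 := by
  simp only [PySem.Chars.isupper, decide_eq_true_eq, char_le_iff, Bool.and_eq_true,
    show 'A'.toNat = 65 from rfl, show 'Z'.toNat = 90 from rfl]

theorem islower_iff (c : Char) :
    PySem.Chars.islower c = true ↔ 97 ≤ c.toNat ∧ c.toNat ≤ 122 := by
  simp only [PySem.Chars.islower, decide_eq_true_eq, char_le_iff, Bool.and_eq_true,
    show 'a'.toNat = 97 from rfl, show 'z'.toNat = 122 from rfl]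

theorem toNat_lowerChar (c : Char) :
    (PySem.Chars.lowerChar c).toNat =
      if 65 ≤ c.toNat ∧ c.toNat ≤ 90 then c.toNat + 32 else c.toNat := by
  simp only [PySem.Chars.lowerChar]
  by_cases h : PySem.Chars.isupper c = true
  · rw [if_pos h, if_pos ((isupper_iff c).mp h), Char.toNat_ofNat, if_pos]
    exact Or.inl (by have := ((isupper_iff c).mp h).2; omega)
  · rw [if_neg h, if_neg (fun hc => h ((isupper_iff c).mpr hc))]

theorem react_symm (a b : Char) : canReact a b = canReact b a := by
  simp only [canReact]
  rw [BEq.comm, Bool.or_comm, Bool.and_comm (PySem.Chars.islower a),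
      Bool.and_comm (PySem.Chars.isupper a)]

theorem react_uniq {a x b : Char} (hx : canReact a x = true) (hb : canReact a b = true) :
    x = b := by
  simp only [canReact, Bool.and_eq_true, Bool.or_eq_true, beq_iff_eq,
    isupper_iff, islower_iff] at hx hb
  have ea := toNat_lowerChar a
  have exx := toNat_lowerChar x
  have eb := toNat_lowerChar b
  have h1 : (PySem.Chars.lowerChar a).toNat = (PySem.Chars.lowerChar x).toNat := by rw [hx.1]
  have h2 : (PySem.Chars.lowerChar a).toNat = (PySem.Chars.lowerChar b).toNat := by rw [hb.1]
  apply Char.ext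
  apply UInt32.toNat_inj.mp
  show x.toNat = b.toNat
  rcases hx.2 with hpx | hpx <;> rcases hb.2 with hpb | hpb <;>
    (split_ifs at ea exx eb <;> omega)

theorem stepA_nil (u : Char) : stepA [] u = [u] := by simp [stepA]

theorem stepA_concat (s : List Char) (x u : Char) :
    stepA (s ++ [x]) u = if canReact u x then s else s ++ [x] ++ [u] := by
  simp [stepA]

-- pushing onto an irreducible stack whose top does not react
theorem stepA_push_of_irr {s : List Char} {u : Char} (h : Irr (s ++ [u])) :
    stepA s u = s ++ [u] := by
  induction s using List.reverseRecOn with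
  | nil => simp [stepA_nil]
  | append_singleton s'' y _ =>
    have hyu : canReact y u = false :=
      (List.isChain_append.mp h).2.2 y (by simp) u rfl
    rw [stepA_concat, if_neg (by simp [react_symm u y, hyu])]

theorem irr_stepA {s : List Char} (hs : Irr s) (u : Char) : Irr (stepA s u) := by
  induction s using List.reverseRecOn with
  | nil =>
    rw [stepA_nil]
    exact List.isChain_singleton u
  | append_singleton s x _ =>
    rw [stepA_concat]
    split
    · exact (List.isChain_append.mp hs).1
    · refine List.isChain_append.mpr ⟨hs, List.isChain_singleton u, ?_⟩
      intro p hp q hq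
      simp only [List.getLast?_concat, Option.mem_def, Option.some.injEq] at hp
      simp only [List.head?_cons, Option.mem_def, Option.some.injEq] at hq
      subst hp; subst hq
      have hne := ‹¬ canReact u x = true›
      rw [react_symm x u]
      simpa using hne

theorem foldl_react {s : List Char} (hs : Irr s) {a b : Char} (hab : canReact a b = true)
    (t : List Char) :
    List.foldl stepA s (a :: b :: t) = List.foldl stepA s t := by
  have hba : canReact b a = true := (react_symm b a).trans hab
  induction s using List.reverseRecOn with
  | nil =>
    simp only [List.foldl_cons, stepA_nil]
    have h1 := stepA_concat [] a b
    simp only [List.nil_append, if_pos hba] at h1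
    rw [h1]
  | append_singleton s' x _ =>
    simp only [List.foldl_cons]
    by_cases hax : canReact a x = true
    · have hxb : x = b := react_uniq hax hab
      rw [stepA_concat, if_pos hax]
      subst hxb
      rw [stepA_push_of_irr hs]
    · rw [stepA_concat, if_neg hax]
      have h2 := stepA_concat (s' ++ [x]) a b
      rw [if_pos hba] at h2
      rw [h2]

theorem foldl_pass (l : List Char) : ∀ s : List Char, Irr s →
    List.foldl stepA s (passB l) = List.foldl stepA s l := by
  induction l using passB.induct with
  | case1 a b t h ih =>
    intro s hs
    rw [passB, if_pos h, ih s hs, foldl_react hs h]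
  | case2 a b t h ih =>
    intro s hs
    rw [passB, if_neg h]
    simp only [List.foldl_cons]
    exact ih (stepA s a) (irr_stepA hs a)
  | case3 l h =>
    intro s _
    cases l with
    | nil => rfl
    | cons a t => cases t with
      | nil => rfl
      | cons b t' => exact absurd rfl (h a b t')

theorem irr_of_passB_eq {l : List Char} (h : passB l = l) : Irr l := by
  induction l using passB.induct with
  | case1 a b t hr ih =>
    exfalso
    rw [passB, if_pos hr] at h
    have h1 := passB_length_le t
    have h2 := congrArg List.length h
    simp only [List.length_cons] at h2
    omega
  | case2 a b t hr ih =>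
    rw [passB, if_neg hr] at h
    injection h with _ ht
    exact List.isChain_cons_cons.mpr ⟨by simpa using hr, ih ht⟩
  | case3 l hl =>
    cases l with
    | nil => exact List.isChain_nil
    | cons a t => cases t with
      | nil => exact List.isChain_singleton a
      | cons b t' => exact absurd rfl (hl a b t')

theorem foldl_of_irr : ∀ (l s : List Char), Irr (s ++ l) → List.foldl stepA s l = s ++ l := by
  intro l
  induction l with
  | nil => intro s _; simp
  | cons a t ih =>
    intro s hs
    simp only [List.foldl_cons]
    have hsa : Irr (s ++ [a]) := by
      have h' : Irr ((s ++ [a]) ++ t) := by simpa using hs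
      exact (List.isChain_append.mp h').1
    rw [stepA_push_of_irr hsa]
    have hassoc : s ++ [a] ++ t = s ++ a :: t := by simp
    rw [ih (s ++ [a]) (by rw [hassoc]; exact hs), hassoc]

theorem passB_eq_of_length_eq {l : List Char} (h : (passB l).length = l.length) :
    passB l = l := by
  induction l using passB.induct with
  | case1 a b t hr ih =>
    exfalso
    rw [passB, if_pos hr] at h
    have := passB_length_le t
    simp only [List.length_cons] at h
    omega
  | case2 a b t hr ih =>
    rw [passB, if_neg hr] at h ⊢
    simp only [List.length_cons, Nat.add_right_cancel_iff] at h
    rw [ih h]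
  | case3 l hl =>
    cases l with
    | nil => rfl
    | cons a t => cases t with
      | nil => rfl
      | cons b t' => exact absurd rfl (hl a b t')

theorem loopB_eq (l : List Char) :
    loopB l = Int.ofNat (List.foldl stepA [] l).length := by
  induction l using loopB.induct with
  | case1 l h =>
    rw [loopB, dif_pos h]
    have hirr : Irr l := irr_of_passB_eq (passB_eq_of_length_eq h)
    rw [foldl_of_irr l [] (by simpa using hirr)]
    simp [h]
  | case2 l h ih =>
    rw [loopB, dif_neg h, ih]
    rw [foldl_pass l [] List.isChain_nil]

-- ===== VERDICT (by name: the statement is the Claim_ definition above) =====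
theorem part_one_spec : Claim_equal_part_one := by
  intro polymer _
  unfold Spec_part_one part_one part_one_alt doReaction
  rw [loopB_eq]
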